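-- pv_equiv track=rewrite | github.com/rheehot/Python_Algorithm | visit_length.py | solution
-- ===== SOURCE A (Python) =====
-- def solution(dirs):
--     move_list = list(dirs[::])
--     pos_list = list()
--     pos = {'x': 0,'y':0}
--     count_list = list()
--     pos_list.append({'x' : pos['x'],'y' : pos['y']})
--     for i in move_list:
--         if i =='U':
--             if pos['y'] < 5:
--                 pos['y'] += 1
--                 pos_list.append({'x' : pos['x'],'y' : pos['y']})
--         elif i == 'D':
--             if pos['y'] > -5:
--                 pos['y'] -= 1
--                 pos_list.append({'x' : pos['x'],'y' : pos['y']})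
--         elif i == 'R':
--             if pos['x'] < 5:
--                 pos['x'] += 1
--                 pos_list.append({'x' : pos['x'],'y' : pos['y']})
--         elif i == 'L':
--             if pos['x'] > -5:
--                 pos['x'] -= 1
--                 pos_list.append({'x' : pos['x'],'y' : pos['y']})
--     check_list=list()
--     for i in range(1,len(pos_list)):
--         check_list.append(str(pos_list[i-1])+"->"+str(pos_list[i]))
--         check_list.append(str(pos_list[i])+"->"+str(pos_list[i-1]))
--     check_list = set(check_list)
--     answer = len(check_list)//2
--     return answer
-- ===== SOURCE B (Python) =====
-- def solution(dirs):
--     x, y = 0, 0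
--     edges = set()
--     for c in dirs:
--         if c == 'U' and y < 5:
--             nx, ny = x, y + 1
--         elif c == 'D' and y > -5:
--             nx, ny = x, y - 1
--         elif c == 'R' and x < 5:
--             nx, ny = x + 1, y
--         elif c == 'L' and x > -5:
--             nx, ny = x - 1, y
--         else:
--             continue
--         if (x, y) <= (nx, ny):
--             edges.add(((x, y), (nx, ny)))
--         else:
--             edges.add(((nx, ny), (x, y)))
--         x, y = nx, ny
--     return len(edges)
-- ===== Notes on version B (the rewrite author's own statement) =====
-- stated objective: simpler
-- what changed: B does one walk keeping only (x,y) and a set of canonically-ordered coordinate-pair edges added at each successful move, replacing A's position list, its second index loop that renders every edge as two dict-repr strings, and the final len//2.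
import Mathlib
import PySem

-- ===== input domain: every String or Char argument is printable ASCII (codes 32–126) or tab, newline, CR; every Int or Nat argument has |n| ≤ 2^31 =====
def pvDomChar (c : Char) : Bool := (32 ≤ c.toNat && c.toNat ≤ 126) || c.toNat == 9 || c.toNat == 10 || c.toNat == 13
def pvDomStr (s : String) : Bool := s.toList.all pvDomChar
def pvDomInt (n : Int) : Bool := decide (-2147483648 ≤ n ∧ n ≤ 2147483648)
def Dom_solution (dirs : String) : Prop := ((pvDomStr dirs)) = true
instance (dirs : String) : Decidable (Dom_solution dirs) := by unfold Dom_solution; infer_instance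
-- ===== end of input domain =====

-- B replaces A's position list, second indexing loop and dict-repr edge strings by a single
-- walk collecting canonically-ordered coordinate-pair edges in a set (objective: simpler).

-- ===== PORT A =====
-- str(pos) for the dict {'x': x, 'y': y} — the exact CPython repr, as a List Char
def pvPosStr (p : Int × Int) : List Char :=
  ['{', '\'', 'x', '\'', ':', ' '] ++ PySem.Int.toChars p.1 ++
    [',', ' ', '\'', 'y', '\'', ':', ' '] ++ PySem.Int.toChars p.2 ++ ['}']

-- one iteration of A's for-loop: update pos and append a copy on a successful move
def pvStepA (st : (Int × Int) × List (Int × Int)) (c : Char) :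
    (Int × Int) × List (Int × Int) :=
  if c = 'U' then
    if st.1.2 < 5 then ((st.1.1, st.1.2 + 1), st.2 ++ [(st.1.1, st.1.2 + 1)]) else st
  else if c = 'D' then
    if st.1.2 > -5 then ((st.1.1, st.1.2 - 1), st.2 ++ [(st.1.1, st.1.2 - 1)]) else st
  else if c = 'R' then
    if st.1.1 < 5 then ((st.1.1 + 1, st.1.2), st.2 ++ [(st.1.1 + 1, st.1.2)]) else st
  else if c = 'L' then
    if st.1.1 > -5 then ((st.1.1 - 1, st.1.2), st.2 ++ [(st.1.1 - 1, st.1.2)]) else st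
  else st

-- A's 'for i in range(1, len(pos_list))' loop, appending both direction strings
def pvCheckList : List (Int × Int) → List (List Char)
  | a :: b :: rest =>
      (pvPosStr a ++ '-' :: '>' :: pvPosStr b) ::
      (pvPosStr b ++ '-' :: '>' :: pvPosStr a) :: pvCheckList (b :: rest)
  | _ => []

def solution (dirs : String) : Int :=
  let st := dirs.toList.foldl pvStepA ((0, 0), [(0, 0)])
  let checkSet : PySem.Set (List Char) := PySem.Set.ofList (pvCheckList st.2)
  PySem.Int.floordiv (checkSet.length : Int) 2

-- ===== PORT B =====
-- the canonically-ordered undirected edge (Python tuple '<=' is the lexicographic order)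
def pvCanon (p q : Int × Int) : (Int × Int) × (Int × Int) :=
  if p.1 < q.1 ∨ (p.1 = q.1 ∧ p.2 ≤ q.2) then (p, q) else (q, p)

-- one iteration of B's for-loop: on a successful move add the canonical edge, else continue
def pvStepB (st : (Int × Int) × PySem.Set ((Int × Int) × (Int × Int))) (c : Char) :
    (Int × Int) × PySem.Set ((Int × Int) × (Int × Int)) :=
  if c = 'U' ∧ st.1.2 < 5 then
    ((st.1.1, st.1.2 + 1), PySem.Set.add st.2 (pvCanon st.1 (st.1.1, st.1.2 + 1)))
  else if c = 'D' ∧ st.1.2 > -5 then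
    ((st.1.1, st.1.2 - 1), PySem.Set.add st.2 (pvCanon st.1 (st.1.1, st.1.2 - 1)))
  else if c = 'R' ∧ st.1.1 < 5 then
    ((st.1.1 + 1, st.1.2), PySem.Set.add st.2 (pvCanon st.1 (st.1.1 + 1, st.1.2)))
  else if c = 'L' ∧ st.1.1 > -5 then
    ((st.1.1 - 1, st.1.2), PySem.Set.add st.2 (pvCanon st.1 (st.1.1 - 1, st.1.2)))
  else st

def solution_alt (dirs : String) : Int :=
  ((dirs.toList.foldl pvStepB ((0, 0), PySem.Set.empty)).2.length : Int)

-- ===== PRECONDITION & SPEC =====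
def Spec_solution (dirs : String) (out : Int) : Prop := out = solution_alt dirs
instance (dirs : String) (out : Int) : Decidable (Spec_solution dirs out) := by unfold Spec_solution; infer_instance

-- ===== CLAIM (what is proved, stated in full; the proofs are below) =====
def Claim_equal_solution : Prop := ∀ (dirs : String), Dom_solution dirs → Spec_solution dirs (solution dirs)

-- ===== LEMMAS AND PROOFS =====
def pvBox : List (Int × Int) :=
  (List.range 11).flatMap (fun i => (List.range 11).map (fun j => ((i : Int) - 5, (j : Int) - 5)))
set_option maxRecDepth 10000 in
theorem pvBox_nodup_str : (pvBox.map pvPosStr).Nodup := by decide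
set_option maxRecDepth 10000 in
theorem pvBox_no_gt : ∀ p ∈ pvBox, '>' ∉ pvPosStr p := by decide
def pvBounded (p : Int × Int) : Prop := -5 ≤ p.1 ∧ p.1 ≤ 5 ∧ -5 ≤ p.2 ∧ p.2 ≤ 5

def pvAdj : List (Int × Int) → List ((Int × Int) × (Int × Int))
  | a :: b :: rest => (a, b) :: pvAdj (b :: rest)
  | _ => []

def pvCanon' (pq : (Int × Int) × (Int × Int)) : (Int × Int) × (Int × Int) := pvCanon pq.1 pq.2
def pvDStr (p q : Int × Int) : List Char := pvPosStr p ++ '-' :: '>' :: pvPosStr q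
def pvSwap (pq : (Int × Int) × (Int × Int)) : (Int × Int) × (Int × Int) := (pq.2, pq.1)
def pvLexLt (a b : Int × Int) : Prop := a.1 < b.1 ∨ (a.1 = b.1 ∧ a.2 < b.2)

theorem mem_pvBox (p : Int × Int) (h : pvBounded p) : p ∈ pvBox := by
  obtain ⟨x, y⟩ := p
  obtain ⟨h1, h2, h3, h4⟩ := h
  interval_cases x <;> interval_cases y <;> decide

theorem pvPosStr_inj (p q : Int × Int) (hp : pvBounded p) (hq : pvBounded q)
    (h : pvPosStr p = pvPosStr q) : p = q :=
  List.inj_on_of_nodup_map pvBox_nodup_str (mem_pvBox p hp) (mem_pvBox q hq) h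

theorem append_gt_inj (a : List Char) : ∀ (c b d : List Char), '>' ∉ a → '>' ∉ c →
    a ++ '>' :: b = c ++ '>' :: d → a = c ∧ b = d := by
  induction a with
  | nil =>
    intro c b d _ hc h
    cases c with
    | nil => simpa using h
    | cons y c' =>
      simp only [List.nil_append, List.cons_append, List.cons.injEq] at h
      exact absurd (h.1 ▸ List.mem_cons_self) hc
  | cons x a' ih =>
    intro c b d ha hc h
    cases c with
    | nil =>
      simp only [List.cons_append, List.nil_append, List.cons.injEq] at h
      exact absurd (h.1 ▸ List.mem_cons_self) ha
    | cons y c' =>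
      simp only [List.cons_append, List.cons.injEq] at h
      obtain ⟨rfl, h2⟩ := h
      have := ih c' b d (fun m => ha (List.mem_cons_of_mem _ m)) (fun m => hc (List.mem_cons_of_mem _ m)) h2
      exact ⟨by rw [this.1], this.2⟩

theorem pvDStr_inj (p q p' q' : Int × Int) (hp : pvBounded p) (hq : pvBounded q)
    (hp' : pvBounded p') (hq' : pvBounded q') (h : pvDStr p q = pvDStr p' q') :
    p = p' ∧ q = q' := by
  have hsplit : (pvPosStr p ++ ['-']) ++ '>' :: pvPosStr q
      = (pvPosStr p' ++ ['-']) ++ '>' :: pvPosStr q' := by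
    simpa [pvDStr, List.append_assoc] using h
  have hnot : ∀ r : Int × Int, pvBounded r → '>' ∉ pvPosStr r ++ ['-'] := by
    intro r hr m
    rcases List.mem_append.1 m with m | m
    · exact pvBox_no_gt r (mem_pvBox r hr) m
    · simp at m
  obtain ⟨h1, h2⟩ := append_gt_inj _ _ _ _ (hnot p hp) (hnot p' hp') hsplit
  have := List.append_cancel_right (as := pvPosStr p) (cs := pvPosStr p') (bs := ['-']) h1
  exact ⟨pvPosStr_inj p p' hp hp' this, pvPosStr_inj q q' hq hq' h2⟩
def pvInv (stA : (Int × Int) × List (Int × Int))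
    (stB : (Int × Int) × PySem.Set ((Int × Int) × (Int × Int))) : Prop :=
  stB.1 = stA.1 ∧ stA.2.getLast? = some stA.1 ∧ pvBounded stA.1 ∧
  (∀ pq ∈ pvAdj stA.2, pq.1 ≠ pq.2 ∧ pvBounded pq.1 ∧ pvBounded pq.2) ∧
  stB.2 = PySem.Set.ofList ((pvAdj stA.2).map pvCanon')

theorem pvAdj_append : ∀ (pl : List (Int × Int)) (pos np : Int × Int),
    pl.getLast? = some pos → pvAdj (pl ++ [np]) = pvAdj pl ++ [(pos, np)]
  | [], _, _, h => by simp at h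
  | [a], pos, np, h => by
      simp at h; subst h; simp [pvAdj]
  | a :: b :: r, pos, np, h => by
      have ih := pvAdj_append (b :: r) pos np (by simpa [List.getLast?_cons_cons] using h)
      simp only [List.cons_append] at ih ⊢
      simp only [pvAdj, ih]
      rfl

theorem pvMove_inv (pos np : Int × Int) (pl : List (Int × Int))
    (es : PySem.Set ((Int × Int) × (Int × Int)))
    (h : pvInv (pos, pl) (pos, es)) (hb : pvBounded np) (hne : pos ≠ np) :
    pvInv (np, pl ++ [np]) (np, PySem.Set.add es (pvCanon pos np)) := by
  obtain ⟨-, h2, h3, h4, h5⟩ := h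
  have h5' : es = PySem.Set.ofList (List.map pvCanon' (pvAdj pl)) := h5
  have ha := pvAdj_append pl pos np h2
  refine ⟨rfl, by simp, hb, ?_, ?_⟩
  · intro pq hpq
    rw [ha] at hpq
    rcases List.mem_append.1 hpq with hm | hm
    · exact h4 pq hm
    · simp only [List.mem_singleton] at hm
      subst hm
      exact ⟨hne, h3, hb⟩
  · show PySem.Set.add es (pvCanon pos np) = _
    rw [ha]
    simp only [List.map_append, List.map_cons, List.map_nil,
      PySem.Set.ofList_append_singleton, h5']
    rfl

theorem pvStep_inv (c : Char) (stA : (Int × Int) × List (Int × Int))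
    (stB : (Int × Int) × PySem.Set ((Int × Int) × (Int × Int)))
    (h : pvInv stA stB) : pvInv (pvStepA stA c) (pvStepB stB c) := by
  obtain ⟨pos, pl⟩ := stA
  obtain ⟨x, y⟩ := pos
  obtain ⟨pos', es⟩ := stB
  obtain ⟨hp, h2, h3, h4, h5⟩ := h
  simp only at hp
  subst hp
  have h' : pvInv ((x, y), pl) ((x, y), es) := ⟨rfl, h2, h3, h4, h5⟩
  obtain ⟨b1, b2, b3, b4⟩ := h3
  simp only at b1 b2 b3 b4
  unfold pvStepA pvStepB
  simp only
  split_ifs <;>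
    first
      | exact h'
      | (exact pvMove_inv _ _ _ _ h' (by simp only [pvBounded]; omega)
          (by simp only [ne_eq, Prod.mk.injEq, not_and]; intro _; omega))
      | tauto
      | simp_all

theorem pvFold_inv (l : List Char) : ∀ stA stB, pvInv stA stB →
    pvInv (l.foldl pvStepA stA) (l.foldl pvStepB stB) := by
  induction l with
  | nil => intro _ _ h; exact h
  | cons c t ih => intro stA stB h; exact ih _ _ (pvStep_inv c stA stB h)
theorem pvCheckList_eq : ∀ pl : List (Int × Int),
    pvCheckList pl = (pvAdj pl).flatMap (fun pq => [pvDStr pq.1 pq.2, pvDStr pq.2 pq.1])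
  | [] => rfl
  | [_] => rfl
  | a :: b :: r => by
      simp only [pvCheckList, pvAdj, pvCheckList_eq (b :: r), List.flatMap_cons, pvDStr]
      rfl

theorem pvToFinset_map {α β : Type} [DecidableEq α] [DecidableEq β] (l : List α) (f : α → β) :
    (l.map f).toFinset = l.toFinset.image f := by
  ext y; simp

theorem pvSetLen_eq_card {α : Type} [BEq α] [LawfulBEq α] [DecidableEq α] (xs : List α) :
    (PySem.Set.ofList xs).length = xs.toFinset.card := by
  have hnd : (PySem.Set.ofList xs).Nodup := PySem.Set.nodup_ofList xs
  have hf : (PySem.Set.ofList xs).toFinset = xs.toFinset := by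
    ext y; simp [List.mem_toFinset, PySem.Set.mem_ofList]
  rw [← hf, List.toFinset_card_of_nodup hnd]

theorem pvSwap_swap (pq : (Int × Int) × (Int × Int)) : pvSwap (pvSwap pq) = pq := rfl

theorem pvCanon'_cases (pq : (Int × Int) × (Int × Int)) :
    pvCanon' pq = pq ∨ pvCanon' pq = pvSwap pq := by
  obtain ⟨p, q⟩ := pq
  unfold pvCanon' pvCanon pvSwap
  split_ifs <;> simp

theorem pvCanon'_lexlt (pq : (Int × Int) × (Int × Int)) (h : pq.1 ≠ pq.2) :
    pvLexLt (pvCanon' pq).1 (pvCanon' pq).2 := by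
  obtain ⟨⟨a, b⟩, ⟨c, d⟩⟩ := pq
  have hne : ¬(a = c ∧ b = d) := by
    intro ⟨h1, h2⟩; exact h (by simp [h1, h2])
  unfold pvCanon' pvCanon pvLexLt
  split_ifs with hc <;> simp only at * <;> omega

theorem pvCount (E : List ((Int × Int) × (Int × Int)))
    (hE : ∀ pq ∈ E, pq.1 ≠ pq.2 ∧ pvBounded pq.1 ∧ pvBounded pq.2) :
    (PySem.Set.ofList (E.flatMap (fun pq => [pvDStr pq.1 pq.2, pvDStr pq.2 pq.1]))).length
      = 2 * (PySem.Set.ofList (E.map pvCanon')).length := by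
  rw [pvSetLen_eq_card, pvSetLen_eq_card]
  -- the directed edge list
  have hmapflat : E.flatMap (fun pq => [pvDStr pq.1 pq.2, pvDStr pq.2 pq.1])
      = (E.flatMap (fun pq => [pq, pvSwap pq])).map (fun pq => pvDStr pq.1 pq.2) := by
    rw [List.map_flatMap]; rfl
  rw [hmapflat, pvToFinset_map]
  have hDmem : ∀ x ∈ (E.flatMap (fun pq => [pq, pvSwap pq])).toFinset,
      x.1 ≠ x.2 ∧ pvBounded x.1 ∧ pvBounded x.2 := by
    intro x hx
    simp only [List.mem_toFinset, List.mem_flatMap, List.mem_cons, List.not_mem_nil,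
      or_false] at hx
    obtain ⟨pq, hpq, rfl | rfl⟩ := hx
    · exact hE x hpq
    · obtain ⟨h1, h2, h3⟩ := hE pq hpq
      exact ⟨fun he => h1 (by simpa [pvSwap] using he.symm), h3, h2⟩
  -- strings are injective on the directed edges
  rw [Finset.card_image_of_injOn (fun a ha b hb hab => by
    obtain ⟨-, ha1, ha2⟩ := hDmem a (by simpa using ha)
    obtain ⟨-, hb1, hb2⟩ := hDmem b (by simpa using hb)
    obtain ⟨e1, e2⟩ := pvDStr_inj a.1 a.2 b.1 b.2 ha1 ha2 hb1 hb2 hab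
    exact Prod.ext e1 e2)]
  -- directed edges = canonical ∪ swapped canonical
  have hsplit : (E.flatMap (fun pq => [pq, pvSwap pq])).toFinset
      = (E.map pvCanon').toFinset ∪ (E.map pvCanon').toFinset.image pvSwap := by
    ext x
    simp only [Finset.mem_union, Finset.mem_image, List.mem_toFinset, List.mem_flatMap,
      List.mem_map, List.mem_cons, List.not_mem_nil, or_false]
    constructor
    · rintro ⟨pq, hpq, h | h⟩
      · rcases pvCanon'_cases pq with hc | hc
        · exact Or.inl ⟨pq, hpq, by rw [hc, h]⟩
        · exact Or.inr ⟨pvCanon' pq, ⟨pq, hpq, rfl⟩, by rw [hc, pvSwap_swap, h]⟩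
      · rcases pvCanon'_cases pq with hc | hc
        · exact Or.inr ⟨pvCanon' pq, ⟨pq, hpq, rfl⟩, by rw [hc, h]⟩
        · exact Or.inl ⟨pq, hpq, by rw [hc, h]⟩
    · rintro (⟨pq, hpq, rfl⟩ | ⟨y, ⟨pq, hpq, rfl⟩, rfl⟩)
      · rcases pvCanon'_cases pq with hc | hc
        · exact ⟨pq, hpq, Or.inl hc⟩
        · exact ⟨pq, hpq, Or.inr hc⟩
      · rcases pvCanon'_cases pq with hc | hc
        · exact ⟨pq, hpq, Or.inr (by rw [hc])⟩
        · exact ⟨pq, hpq, Or.inl (by rw [hc, pvSwap_swap])⟩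
  rw [hsplit]
  have hdisj : Disjoint ((E.map pvCanon').toFinset)
      ((E.map pvCanon').toFinset.image pvSwap) := by
    rw [Finset.disjoint_left]
    rintro x hx hx'
    simp only [Finset.mem_image, List.mem_toFinset, List.mem_map] at hx hx'
    obtain ⟨pq, hpq, rfl⟩ := hx
    obtain ⟨y, ⟨pq', hpq', rfl⟩, hy⟩ := hx'
    have l1 := pvCanon'_lexlt pq (hE pq hpq).1
    have l2 := pvCanon'_lexlt pq' (hE pq' hpq').1
    rw [← hy] at l1
    simp only [pvLexLt, pvSwap] at l1 l2
    omega
  rw [Finset.card_union_of_disjoint hdisj,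
    Finset.card_image_of_injective _ (fun a b hab => by
      simpa [pvSwap, Prod.ext_iff, and_comm] using hab)]
  omega
-- ===== VERDICT (by name: the statement is the Claim_ definition above) =====
theorem solution_spec : Claim_equal_solution := by
  unfold Claim_equal_solution
  intro dirs _
  unfold Spec_solution
  have h := pvFold_inv dirs.toList ((0, 0), [(0, 0)]) ((0, 0), PySem.Set.empty)
    ⟨rfl, rfl, ⟨by norm_num, by norm_num, by norm_num, by norm_num⟩,
     by intro pq hpq; simp [pvAdj] at hpq, rfl⟩
  obtain ⟨h1, h2, h3, h4, h5⟩ := h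
  simp only [solution, solution_alt]
  rw [pvCheckList_eq, pvCount _ h4, h5]
  rw [PySem.Int.floordiv_eq_ediv_of_pos (by norm_num)]
  push_cast
  omega
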